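-- pv_equiv track=rewrite | github.com/NachoPereda/mqnppes | rqmemat.py | generate_rmqe_formula
-- ===== SOURCE A (Python) =====
-- def generate_rmqe_formula(n, m):
--     rmqe_formula = ""
--
--     for p in range(1, m+1):
--         #rmqe_formula += f'('
--
--         # Generate the xi * xj terms
--         for i in range(1, n+1):
--             for j in range(i, n+1):
--                 rmqe_formula += f'p({i},{j}) * x{i} * x{j} + '
--
--         # Generate the xi terms
--         for i in range(1, n+1):
--             rmqe_formula += f'p({i}) * x{i} + '
--
--         # Add the constant term p(m)0 and close the bracket
--         rmqe_formula += f'p(0)'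
--
--         # Add the closing bracket for P(m) and a plus sign if not the last term
--         if p != m:
--             rmqe_formula += ') + '
--         #else:
--         #    rmqe_formula += ')'
--
--     return rmqe_formula
-- ===== SOURCE B (Python) =====
-- def generate_rmqe_formula(n, m):
--     if m <= 0:
--         return ''
--     terms = [f'p({i},{j}) * x{i} * x{j}' for i in range(1, n + 1) for j in range(i, n + 1)]
--     terms += [f'p({i}) * x{i}' for i in range(1, n + 1)]
--     block = ''.join(t + ' + ' for t in terms) + 'p(0)'
--     return (block + ') + ') * (m - 1) + block
-- ===== Notes on version B (the rewrite author's own statement) =====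
-- stated objective: simpler
-- what changed: B builds the per-P block once as a joined list of terms and returns m copies via string repetition '(block + ") + ") * (m-1) + block', removing A's outer loop that regenerates the identical block each iteration and its last-iteration separator special case.
import Mathlib
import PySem

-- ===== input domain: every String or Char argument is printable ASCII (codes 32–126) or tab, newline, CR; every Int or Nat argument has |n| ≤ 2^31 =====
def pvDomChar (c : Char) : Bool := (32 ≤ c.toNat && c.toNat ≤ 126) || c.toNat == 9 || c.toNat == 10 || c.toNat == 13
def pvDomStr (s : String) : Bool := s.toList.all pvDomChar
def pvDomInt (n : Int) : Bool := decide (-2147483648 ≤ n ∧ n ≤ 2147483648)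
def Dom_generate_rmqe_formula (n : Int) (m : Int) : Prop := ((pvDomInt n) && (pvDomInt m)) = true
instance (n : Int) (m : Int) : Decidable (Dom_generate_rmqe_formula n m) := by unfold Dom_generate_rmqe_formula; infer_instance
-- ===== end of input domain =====

-- B builds the per-P block once and emits m copies by string repetition, replacing A's outer loop that regenerates the identical block each iteration (simpler).


-- ===== PORT A =====
def generate_rmqe_formula (n : Int) (m : Int) : String :=
  (PySem.List.pyRange 1 (m+1) 1).foldl (fun acc p =>
    -- the xi * xj terms
    let acc := (PySem.List.pyRange 1 (n+1) 1).foldl (fun acc i =>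
      (PySem.List.pyRange i (n+1) 1).foldl (fun acc j =>
        acc ++ "p(" ++ PySem.Int.toStr i ++ "," ++ PySem.Int.toStr j ++ ") * x" ++
          PySem.Int.toStr i ++ " * x" ++ PySem.Int.toStr j ++ " + ") acc) acc
    -- the xi terms
    let acc := (PySem.List.pyRange 1 (n+1) 1).foldl (fun acc i =>
      acc ++ "p(" ++ PySem.Int.toStr i ++ ") * x" ++ PySem.Int.toStr i ++ " + ") acc
    -- the constant term
    let acc := acc ++ "p(0)"
    -- closing bracket and plus sign if not the last term
    if p ≠ m then acc ++ ") + " else acc) ""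

-- ===== PORT B =====
-- hand port of Python's string repetition s * k (k ≥ 0): k concatenated copies of s — exact
def pyStrMul (k : Nat) (s : String) : String :=
  match k with
  | 0 => ""
  | k+1 => s ++ pyStrMul k s

def generate_rmqe_formula_alt (n : Int) (m : Int) : String :=
  if m ≤ 0 then "" else
  let terms := (PySem.List.pyRange 1 (n+1) 1).flatMap (fun i =>
    (PySem.List.pyRange i (n+1) 1).map (fun j =>
      "p(" ++ PySem.Int.toStr i ++ "," ++ PySem.Int.toStr j ++ ") * x" ++
        PySem.Int.toStr i ++ " * x" ++ PySem.Int.toStr j))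
  let terms := terms ++ (PySem.List.pyRange 1 (n+1) 1).map (fun i =>
    "p(" ++ PySem.Int.toStr i ++ ") * x" ++ PySem.Int.toStr i)
  let block := PySem.Str.join "" (terms.map (fun t => t ++ " + ")) ++ "p(0)"
  pyStrMul (m-1).toNat (block ++ ") + ") ++ block

-- ===== PRECONDITION & SPEC =====
def Spec_generate_rmqe_formula (n : Int) (m : Int) (out : String) : Prop := out = generate_rmqe_formula_alt n m
instance (n : Int) (m : Int) (out : String) : Decidable (Spec_generate_rmqe_formula n m out) := by unfold Spec_generate_rmqe_formula; infer_instance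

-- ===== CLAIM (what is proved, stated in full; the proofs are below) =====
def Claim_equal_generate_rmqe_formula : Prop := ∀ (n : Int) (m : Int), Dom_generate_rmqe_formula n m → Spec_generate_rmqe_formula n m (generate_rmqe_formula n m)

-- ===== LEMMAS AND PROOFS =====

-- concatenation of f over a list (the shape both programs' string building reduces to)
def catMap {α : Type} (f : α → String) : List α → String
  | [] => ""
  | x :: xs => f x ++ catMap f xs

def pairStr (i j : Int) : String :=
  "p(" ++ PySem.Int.toStr i ++ "," ++ PySem.Int.toStr j ++ ") * x" ++
    PySem.Int.toStr i ++ " * x" ++ PySem.Int.toStr j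

def linStr (i : Int) : String :=
  "p(" ++ PySem.Int.toStr i ++ ") * x" ++ PySem.Int.toStr i

-- the invariant per-P block
def blockStr (n : Int) : String :=
  catMap (fun i => catMap (fun j => pairStr i j ++ " + ") (PySem.List.pyRange i (n+1) 1))
      (PySem.List.pyRange 1 (n+1) 1) ++
    catMap (fun i => linStr i ++ " + ") (PySem.List.pyRange 1 (n+1) 1) ++ "p(0)"

theorem foldl_hoist {α : Type} (g : String → α → String) (h : α → String)
    (hg : ∀ a x, g a x = a ++ h x) (l : List α) (acc : String) :
    l.foldl g acc = acc ++ catMap h l := by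
  induction l generalizing acc with
  | nil => simp [catMap]
  | cons x xs ih => simp [List.foldl, hg, catMap, ih, String.append_assoc]

theorem catMap_append {α : Type} (f : α → String) (l₁ l₂ : List α) :
    catMap f (l₁ ++ l₂) = catMap f l₁ ++ catMap f l₂ := by
  induction l₁ with
  | nil => simp [catMap]
  | cons x xs ih => simp [catMap, ih, String.append_assoc]

theorem catMap_map {α β : Type} (f : β → String) (g : α → β) (l : List α) :
    catMap f (l.map g) = catMap (fun x => f (g x)) l := by
  induction l with
  | nil => simp [catMap]
  | cons x xs ih => simp [catMap, ih]

theorem catMap_flatMap {α β : Type} (f : β → String) (g : α → List β) (l : List α) :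
    catMap f (l.flatMap g) = catMap (fun x => catMap f (g x)) l := by
  induction l with
  | nil => simp [catMap]
  | cons x xs ih => simp [catMap, List.flatMap_cons, catMap_append, ih]

theorem catMap_const {α : Type} (s : String) (l : List α) :
    catMap (fun _ => s) l = pyStrMul l.length s := by
  induction l with
  | nil => simp [catMap, pyStrMul]
  | cons x xs ih => simp [catMap, pyStrMul, ih]

theorem toList_catMap {α : Type} (f : α → String) (l : List α) :
    (catMap f l).toList = (l.map (fun x => (f x).toList)).flatten := by
  induction l with
  | nil => simp [catMap]
  | cons x xs ih => simp [catMap, String.toList_append, ih]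

theorem flatten_intersperse_nil (l : List (List Char)) :
    (List.intersperse ([] : List Char) l).flatten = l.flatten := by
  induction l with
  | nil => rfl
  | cons x xs ih =>
    cases xs with
    | nil => rfl
    | cons y t => simp only [List.intersperse_cons₂, List.flatten_cons] at *; simp [ih]

theorem join_empty_sep (l : List String) :
    PySem.Str.join "" l = catMap (fun s => s) l := by
  apply String.toList_inj.mp
  rw [PySem.Str.toList_join, toList_catMap]
  simp [PySem.Chars.join, List.intercalate, flatten_intersperse_nil]

-- A's loop body, rewritten as "append the block (and separator unless last)"
theorem a_eq (n m : Int) :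
    generate_rmqe_formula n m =
      (PySem.List.pyRange 1 (m+1) 1).foldl
        (fun acc p => if p ≠ m then acc ++ (blockStr n ++ ") + ") else acc ++ blockStr n) "" := by
  unfold generate_rmqe_formula
  congr 1
  funext acc p
  have h1 : ∀ (a : String),
      (PySem.List.pyRange 1 (n+1) 1).foldl (fun acc i =>
        (PySem.List.pyRange i (n+1) 1).foldl (fun acc j =>
          acc ++ "p(" ++ PySem.Int.toStr i ++ "," ++ PySem.Int.toStr j ++ ") * x" ++
            PySem.Int.toStr i ++ " * x" ++ PySem.Int.toStr j ++ " + ") acc) a =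
      a ++ catMap (fun i => catMap (fun j => pairStr i j ++ " + ") (PySem.List.pyRange i (n+1) 1))
        (PySem.List.pyRange 1 (n+1) 1) := by
    intro a
    apply foldl_hoist
    intro a' i
    apply foldl_hoist
    intro a'' j
    simp [pairStr, String.append_assoc]
  have h2 : ∀ (a : String),
      (PySem.List.pyRange 1 (n+1) 1).foldl (fun acc i =>
        acc ++ "p(" ++ PySem.Int.toStr i ++ ") * x" ++ PySem.Int.toStr i ++ " + ") a =
      a ++ catMap (fun i => linStr i ++ " + ") (PySem.List.pyRange 1 (n+1) 1) := by
    intro a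
    apply foldl_hoist
    intro a' i
    simp [linStr, String.append_assoc]
  simp only [h1, h2]
  split_ifs with hp <;> simp [blockStr, String.append_assoc]

theorem block_eq (n : Int) :
    PySem.Str.join "" ((((PySem.List.pyRange 1 (n+1) 1).flatMap (fun i =>
        (PySem.List.pyRange i (n+1) 1).map (fun j => pairStr i j))) ++
      (PySem.List.pyRange 1 (n+1) 1).map (fun i => linStr i)).map (fun t => t ++ " + ")) ++ "p(0)" =
      blockStr n := by
  rw [join_empty_sep, catMap_map, catMap_append, catMap_flatMap]
  simp only [catMap_map, blockStr]

theorem b_eq (n m : Int) :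
    generate_rmqe_formula_alt n m =
      if m ≤ 0 then "" else pyStrMul (m-1).toNat (blockStr n ++ ") + ") ++ blockStr n := by
  by_cases hm : m ≤ 0
  · rw [if_pos hm]
    exact if_pos hm
  · rw [if_neg hm]
    rw [show generate_rmqe_formula_alt n m =
        pyStrMul (m-1).toNat
          ((PySem.Str.join "" ((((PySem.List.pyRange 1 (n+1) 1).flatMap (fun i =>
              (PySem.List.pyRange i (n+1) 1).map (fun j => pairStr i j))) ++
            (PySem.List.pyRange 1 (n+1) 1).map (fun i => linStr i)).map (fun t => t ++ " + ")) ++ "p(0)") ++ ") + ") ++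
          (PySem.Str.join "" ((((PySem.List.pyRange 1 (n+1) 1).flatMap (fun i =>
              (PySem.List.pyRange i (n+1) 1).map (fun j => pairStr i j))) ++
            (PySem.List.pyRange 1 (n+1) 1).map (fun i => linStr i)).map (fun t => t ++ " + ")) ++ "p(0)")
      from if_neg hm, block_eq]

-- ===== VERDICT (by name: the statement is the Claim_ definition above) =====
theorem generate_rmqe_formula_spec : Claim_equal_generate_rmqe_formula := by
  intro n m _
  unfold Spec_generate_rmqe_formula
  rw [a_eq, b_eq]
  by_cases hm : m ≤ 0
  · rw [PySem.List.pyRange_one_eq_nil (by omega : (m+1 : Int) ≤ 1), if_pos hm]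
    rfl
  · have h1m : (1 : Int) ≤ m := by omega
    rw [if_neg hm]
    rw [PySem.List.pyRange_one_append 1 m (m+1) h1m (by omega), List.foldl_append,
      PySem.List.pyRange_one_singleton]
    have hpre : (PySem.List.pyRange 1 m 1).foldl
        (fun acc p => if p ≠ m then acc ++ (blockStr n ++ ") + ") else acc ++ blockStr n) "" =
        (PySem.List.pyRange 1 m 1).foldl (fun acc _ => acc ++ (blockStr n ++ ") + ")) "" := by
      apply PySem.List.foldl_congr_mem
      intro acc p hp
      have := (PySem.List.mem_pyRange_one.mp hp).2
      simp [show p ≠ m by omega]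
    rw [hpre]
    rw [foldl_hoist (g := fun acc _ => acc ++ (blockStr n ++ ") + "))
      (h := fun _ => blockStr n ++ ") + ") (fun _ _ => rfl) _ ""]
    rw [catMap_const, PySem.List.length_pyRange_one]
    simp [List.foldl]
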